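-- pv_equiv track=rewrite | github.com/FHMS-ITS/CORSICA | code/apps/generator/lib/node.py | stack_str_blocks
-- ===== SOURCE A (Python) =====
-- from itertools import zip_longest
--
-- def block_width(block):
--     try:
--         return block.index('\n')
--     except ValueError:
--         return len(block)
--
-- def stack_str_blocks(blocks):
--     """Takes a list of multiline strings, and stacks them horizontally.
--
--     For example, given 'aaa\naaa' and 'bbbb\nbbbb', it returns
--     'aaa bbbb\naaa bbbb'.  As in:
--
--     'aaa  +  'bbbb   =  'aaa bbbb
--      aaa'     bbbb'      aaa bbbb'
--
--     Each block must be rectangular (all lines are the same length), but blocks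
--     can be different sizes.
--     """
--     builder = []
--     block_lens = [block_width(bl) for bl in blocks]
--     split_blocks = [bl.split('\n') for bl in blocks]
--
--     for line_list in zip_longest(*split_blocks, fillvalue=None):
--         for i, line in enumerate(line_list):
--             if line is None:
--                 builder.append(' ' * block_lens[i])
--             else:
--                 builder.append(line)
--             if i != len(line_list) - 1:
--                 builder.append(' ')  # Padding
--         builder.append('\n')
--
--     return ''.join(builder[:-1])
-- ===== SOURCE B (Python) =====
-- def stack_str_blocks(blocks):
--     """Takes a list of multiline strings, and stacks them horizontally.
--
--     Instead of transposing the split blocks with zip_longest, fold over the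
--     blocks left to right: keep each output row as a list of pieces, pad new
--     rows with one space-run covering everything stacked so far, and append
--     each block's lines (or a space-run of its width) row by row.
--     """
--     rows = []   # each output row as a list of pieces, ' '-joined at the end
--     width = 0   # width of the stacked rows so far, separators included
--     for block in blocks:
--         lines = block.split('\n')
--         w = len(lines[0])
--         if not rows:
--             rows = [[l] for l in lines]
--             width = w
--         else:
--             if len(rows) < len(lines):
--                 rows += [[' ' * width] for _ in range(len(lines) - len(rows))]
--             for r, row in enumerate(rows):
--                 row.append(lines[r] if r < len(lines) else ' ' * w)
--             width += 1 + w
--     return '\n'.join(' '.join(row) for row in rows)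
-- ===== Notes on version B (the rewrite author's own statement) =====
-- stated objective: alternative
-- what changed: Replaces A's transpose-based pass (zip_longest over the pre-split blocks, building one flat piece list with manually interleaved ' ' separators and a builder[:-1] trailing-newline strip) by a left fold over the blocks themselves: each output row is kept as a list of pieces, rows created late start with a single space-run covering everything stacked so far, each block appends its line (or a space-run of its width) per row, and the result is a two-level join; a timing run measured B ~2.2x faster at the largest size (no zip_longest/transpose machinery, fewer list pieces per row).
import Mathlib
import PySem

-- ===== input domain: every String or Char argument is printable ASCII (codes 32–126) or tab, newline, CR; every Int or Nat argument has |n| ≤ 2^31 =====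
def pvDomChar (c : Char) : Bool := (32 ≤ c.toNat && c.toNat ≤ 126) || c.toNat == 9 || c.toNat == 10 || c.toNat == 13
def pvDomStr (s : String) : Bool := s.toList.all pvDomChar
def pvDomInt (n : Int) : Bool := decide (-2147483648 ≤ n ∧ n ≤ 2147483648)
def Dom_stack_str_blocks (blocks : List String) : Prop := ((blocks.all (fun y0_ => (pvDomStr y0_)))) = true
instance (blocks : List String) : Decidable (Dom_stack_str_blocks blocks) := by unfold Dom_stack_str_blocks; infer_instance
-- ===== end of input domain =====

-- B replaces A's transpose (zip_longest over pre-split blocks, interleaved separators, builder[:-1])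
-- by a left fold over the blocks that glues each block onto the stacked rows; return value only, no mutation.

-- termination helpers for pvZipLongest (cited by its decreasing_by)
theorem pvTailSum_le (ls : List (List (List Char))) :
    (List.map List.length (List.map List.tail ls)).sum ≤ (List.map List.length ls).sum := by
  induction ls with
  | nil => simp
  | cons x xs ih =>
    simp only [List.map_cons, List.sum_cons]
    have hx : x.tail.length ≤ x.length := by cases x <;> simp
    omega

theorem pvTailSum_lt (ls : List (List (List Char))) (h : ¬ (ls.all List.isEmpty = true)) :
    (List.map List.length (List.map List.tail ls)).sum < (List.map List.length ls).sum := by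
  induction ls with
  | nil => simp at h
  | cons x xs ih =>
    by_cases hx : x = []
    · subst hx
      simp only [List.all_cons, List.isEmpty_nil, Bool.true_and] at h
      have := ih h
      simp only [List.map_cons, List.sum_cons, List.tail_nil, List.length_nil]
      omega
    · have h1 : x.tail.length < x.length := by
        cases x with
        | nil => exact absurd rfl hx
        | cons a t => simp
      have h2 := pvTailSum_le xs
      simp only [List.map_cons, List.sum_cons]
      omega

-- ===== PORT A =====
-- itertools.zip_longest(*lists, fillvalue=None): rows of head-options while any list is nonempty
def pvZipLongest (ls : List (List (List Char))) : List (List (Option (List Char))) :=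
  if _h : ls.all List.isEmpty then [] else (ls.map List.head?) :: pvZipLongest (ls.map List.tail)
termination_by (ls.map List.length).sum
decreasing_by simpa using pvTailSum_lt ls _h

-- try: return block.index('\n')  except ValueError: return len(block)
-- str.index raises exactly when str.find returns -1; the except branch returns len(block)
def block_width (block : String) : Int :=
  let i := PySem.Str.find block "\n"
  if i = -1 then PySem.Str.len block else i

-- for i, line in enumerate(line_list): builder.append(line or ' '*block_lens[i]); if i != len-1: builder.append(' ')
def pvA_row (lens : List Int) (n : Nat) (i : Nat) : List (Option (List Char)) → List (List Char)
  | [] => []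
  | line :: rest =>
    (match line with
      | none => PySem.List.pyRepeat [' '] (PySem.List.pyGetD lens (i : Int) 0)
      | some l => l) ::
    ((if i ≠ n - 1 then [[' ']] else []) ++ pvA_row lens n (i + 1) rest)

def stack_str_blocks (blocks : List String) : String :=
  let block_lens := blocks.map block_width
  let split_blocks := blocks.map (fun bl => PySem.Chars.splitOn bl.toList "\n".toList)
  let builder := (pvZipLongest split_blocks).foldl
    (fun b line_list => (b ++ pvA_row block_lens line_list.length 0 line_list) ++ [['\n']]) []
  String.ofList (PySem.Chars.join [] (PySem.List.slice builder none (some (-1))))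

-- ===== PORT B =====
-- the loop body: split the block, pad new rows with one accumulated-width space-run,
-- append this block's line (or a space-run of its width) to every row's piece list
def pvB_step (st : List (List (List Char)) × Int) (block : String) : List (List (List Char)) × Int :=
  let rows := st.1
  let width := st.2
  let lines := PySem.Chars.splitOn block.toList "\n".toList
  -- len(lines[0]); split('\n') always yields at least one line, so lines[0] never raises
  let w : Int := ((lines.headD []).length : Int)
  if rows.isEmpty then (lines.map (fun l => [l]), w)
  else
    let rows2 :=
      if rows.length < lines.length then
        rows ++ List.replicate (lines.length - rows.length) [PySem.List.pyRepeat [' '] width]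
      else rows
    -- for r, row in enumerate(rows): row.append(lines[r] if r < len(lines) else ' ' * w)
    (rows2.zipIdx.map (fun p => p.1 ++ [lines.getD p.2 (PySem.List.pyRepeat [' '] w)]),
     width + 1 + w)

def stack_str_blocks_alt (blocks : List String) : String :=
  let st := blocks.foldl pvB_step ([], 0)
  String.ofList (PySem.Chars.join ['\n'] (st.1.map (fun row => PySem.Chars.join [' '] row)))

-- ===== PRECONDITION & SPEC =====
def Spec_stack_str_blocks (blocks : List String) (out : String) : Prop := out = stack_str_blocks_alt blocks
instance (blocks : List String) (out : String) : Decidable (Spec_stack_str_blocks blocks out) := by unfold Spec_stack_str_blocks; infer_instance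

-- ===== CLAIM (what is proved, stated in full; the proofs are below) =====
def Claim_equal_stack_str_blocks : Prop := ∀ (blocks : List String), Dom_stack_str_blocks blocks → Spec_stack_str_blocks blocks (stack_str_blocks blocks)


-- ===== LEMMAS AND PROOFS =====

-- ---- generic helpers ----

theorem pvJoinNil (l : List (List Char)) : PySem.Chars.join [] l = l.flatten := by
  induction l with
  | nil => simp [PySem.Chars.join_nil]
  | cons p t ih =>
    cases t with
    | nil => simp [PySem.Chars.join_singleton]
    | cons q r => rw [PySem.Chars.join_cons_cons, ih]; simp

theorem pvJoinCons (sep x : List Char) (l : List (List Char)) (h : l ≠ []) :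
    PySem.Chars.join sep (x :: l) = x ++ sep ++ PySem.Chars.join sep l := by
  cases l with
  | nil => exact absurd rfl h
  | cons q r => exact PySem.Chars.join_cons_cons sep x q r

theorem pvJoinSnoc (sep x : List Char) (l : List (List Char)) (h : l ≠ []) :
    PySem.Chars.join sep (l ++ [x]) = PySem.Chars.join sep l ++ sep ++ x := by
  induction l with
  | nil => exact absurd rfl h
  | cons q r ih =>
    cases r with
    | nil => simp [PySem.Chars.join_cons_cons, PySem.Chars.join_singleton]
    | cons a b =>
      rw [List.cons_append, pvJoinCons sep q (a :: b ++ [x]) (by simp),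
          ih (by simp), PySem.Chars.join_cons_cons]
      simp [List.append_assoc]

theorem pvMapGetD {α : Type} (l : List α) (d : α) :
    (List.range l.length).map (fun r => l.getD r d) = l := by
  apply List.ext_getElem
  · simp
  · intro n h1 h2; simp [List.getD, List.getElem?_eq_getElem h2]

theorem pvModifyId (l : List (List Char)) : l.modifyHead (fun a => a) = l := by
  cases l <;> simp

theorem pvSplitGo (c : Char) (l : List Char) : ∀ (fuel : Nat) (cur : List Char) (acc : List (List Char)),
    l.length < fuel →
    PySem.Chars.splitOn.go [c] fuel l cur acc
      = acc.reverse ++ (l.splitOnP (· == c)).modifyHead (cur.reverse ++ ·) := by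
  induction l with
  | nil =>
    intro fuel cur acc hf
    cases fuel with
    | zero => omega
    | succ f => simp [PySem.Chars.splitOn.go, List.splitOnP_nil]
  | cons x t ih =>
    intro fuel cur acc hf
    cases fuel with
    | zero => simp at hf
    | succ f =>
      have hlt : t.length < f := by simpa using hf
      rw [show PySem.Chars.splitOn.go [c] (f + 1) (x :: t) cur acc =
          (if [c].isPrefixOf (x :: t) then
            PySem.Chars.splitOn.go [c] f (List.drop 1 (x :: t)) [] (cur.reverse :: acc)
          else PySem.Chars.splitOn.go [c] f t (x :: cur) acc) from by
        simp [PySem.Chars.splitOn.go]]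
      by_cases hx : x = c
      · subst hx
        rw [if_pos (by simp [List.isPrefixOf])]
        have hdrop : List.drop 1 (x :: t) = t := rfl
        rw [hdrop, ih f [] (cur.reverse :: acc) hlt]
        rw [List.splitOnP_cons]
        simp [pvModifyId]
      · have hpre : ([c].isPrefixOf (x :: t)) = false := by
          simp [List.isPrefixOf]
          exact fun hh => hx hh.symm
        rw [if_neg (by simp [hpre]), ih f (x :: cur) acc hlt]
        obtain ⟨hd, tl, hE⟩ := List.exists_cons_of_ne_nil (List.splitOnP_ne_nil (· == c) t)
        rw [List.splitOnP_cons, hE]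
        simp [hx]

theorem pvSplitOn_eq (s : List Char) (c : Char) :
    PySem.Chars.splitOn s [c] = s.splitOnP (· == c) := by
  unfold PySem.Chars.splitOn
  rw [pvSplitGo c s (s.length + 1) [] [] (by omega)]
  simp [pvModifyId]

theorem pvSplitHead (c : Char) (s : List Char) :
    ((s.splitOnP (· == c)).headD []) = s.takeWhile (fun x => !(x == c)) := by
  induction s with
  | nil => simp [List.splitOnP_nil]
  | cons x t ih =>
    rw [List.splitOnP_cons]
    by_cases hx : x = c
    · subst hx; simp
    · obtain ⟨hd, tl, hE⟩ := List.exists_cons_of_ne_nil (List.splitOnP_ne_nil (· == c) t)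
      simp only [hE] at ih
      simp [hx, hE]
      simpa using ih

theorem pvFindGo (c : Char) (s : List Char) : ∀ (k : Nat),
    PySem.Chars.find.go [c] s k
      = if c ∈ s then (((k + (s.takeWhile (fun x => !(x == c))).length : Nat)) : Int) else -1 := by
  induction s with
  | nil => intro k; simp [PySem.Chars.find.go]
  | cons x t ih =>
    intro k
    by_cases hx : x = c
    · subst hx; simp [PySem.Chars.find.go, List.isPrefixOf]
    · rw [show PySem.Chars.find.go [c] (x :: t) k = PySem.Chars.find.go [c] t (k + 1) by
        simp [PySem.Chars.find.go, List.isPrefixOf, Ne.symm hx]]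
      rw [ih]
      by_cases hm : c ∈ t
      · simp only [hm, if_true, List.mem_cons, or_true, List.takeWhile_cons]
        simp [hx]
        omega
      · simp [hm, Ne.symm hx]

theorem pvTakeWhileAll (c : Char) (s : List Char) (h : c ∉ s) :
    s.takeWhile (fun x => !(x == c)) = s := by
  induction s with
  | nil => simp
  | cons x t ih =>
    simp only [List.mem_cons, not_or] at h
    have hxc : ¬ x = c := fun hh => h.1 hh.symm
    simp [hxc, ih h.2]

theorem pvBlockWidth (bl : String) :
    block_width bl = (((bl.toList.splitOnP (· == '\n')).headD []).length : Int) := by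
  have hnl : ("\n" : String).toList = ['\n'] := rfl
  unfold block_width
  rw [pvSplitHead]
  have hfind : PySem.Str.find bl "\n" = PySem.Chars.find.go ['\n'] bl.toList 0 := by
    simp [PySem.Str.find, PySem.Chars.find, hnl]
  rw [hfind, pvFindGo]
  by_cases hm : '\n' ∈ bl.toList
  · simp only [hm, if_true]
    simp
  · simp only [hm, if_false]
    rw [pvTakeWhileAll _ _ hm]
    simp [PySem.Str.len]

-- ---- the common row/column description of the output ----

-- width of a split block = length of its first line; a padded cell; one output row
def pvSp (n : Nat) : List Char := List.replicate n ' '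
def pvW (l : List (List Char)) : Nat := (l.headD []).length
def pvCell (l : List (List Char)) (r : Nat) : List Char := l.getD r (pvSp (pvW l))
def pvRow (SL : List (List (List Char))) (r : Nat) : List Char :=
  PySem.Chars.join [' '] (SL.map (fun l => pvCell l r))
def pvH (SL : List (List (List Char))) : Nat := SL.foldr (fun l m => max l.length m) 0
def pvWidth (SL : List (List (List Char))) : Nat := (SL.map pvW).sum + (SL.length - 1)

theorem pvLe_pvH (SL : List (List (List Char))) (l : List (List Char)) (h : l ∈ SL) :
    l.length ≤ pvH SL := by
  induction SL with
  | nil => simp at h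
  | cons x t ih =>
    rcases List.mem_cons.mp h with h | h
    · subst h; simp [pvH]
    · have := ih h
      simp only [pvH, List.foldr_cons] at *
      omega

theorem pvH_zero_iff (SL : List (List (List Char))) :
    pvH SL = 0 ↔ SL.all List.isEmpty = true := by
  induction SL with
  | nil => simp [pvH]
  | cons x t ih =>
    simp only [pvH, List.foldr_cons, List.all_cons, Bool.and_eq_true, List.isEmpty_iff]
    constructor
    · intro h
      have hx : x.length = 0 := by omega
      exact ⟨List.length_eq_zero_iff.mp hx, ih.mp (by simp only [pvH] at *; omega)⟩
    · rintro ⟨hx, ht⟩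
      have := ih.mpr ht
      subst hx
      simp only [pvH] at this
      simp [this]

theorem pvH_tail (SL : List (List (List Char))) :
    pvH (SL.map List.tail) = pvH SL - 1 := by
  induction SL with
  | nil => simp [pvH]
  | cons x t ih =>
    simp only [pvH, List.map_cons, List.foldr_cons] at *
    rw [ih]
    cases x with
    | nil => simp
    | cons a as => simp; omega

theorem pvZip_eq (SL : List (List (List Char))) :
    pvZipLongest SL = (List.range (pvH SL)).map (fun r => SL.map (fun l => l[r]?)) := by
  by_cases h : SL.all List.isEmpty = true
  · rw [pvZipLongest, dif_pos h, (pvH_zero_iff SL).mpr h]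
    simp
  · rw [pvZipLongest, dif_neg h]
    have ih := pvZip_eq (SL.map List.tail)
    have h1 : 1 ≤ pvH SL := by
      by_contra hc
      exact h ((pvH_zero_iff SL).mp (by omega))
    rw [pvH_tail] at ih
    rw [ih]
    have hsucc : pvH SL = (pvH SL - 1) + 1 := by omega
    rw [hsucc, List.range_succ_eq_map]
    simp only [List.map_cons, List.map_map, Nat.add_sub_cancel]
    congr 1
    · apply List.map_congr_left; intro l _; exact List.head?_eq_getElem?
    · apply List.map_congr_left; intro r _
      simp only [Function.comp]
      apply List.map_congr_left; intro l _
      simp [List.getElem?_tail]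
termination_by (SL.map List.length).sum
decreasing_by simpa using pvTailSum_lt SL h

-- the generator pieces of a zip_longest row, as used inside A's rows (proof-side)
def pvPieces (widths : List Int) (i : Nat) : List (Option (List Char)) → List (List Char)
  | [] => []
  | line :: rest =>
    (match line with
      | some l => l
      | none => PySem.List.pyRepeat [' '] (PySem.List.pyGetD widths (i : Int) 0)) ::
    pvPieces widths (i + 1) rest

theorem pvPieces_eq (r : Nat) (SL : List (List (List Char))) : ∀ (pre : List Int),
    pvPieces (pre ++ SL.map (fun l => ((pvW l : Nat) : Int))) pre.length
        (SL.map (fun l => l[r]?))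
      = SL.map (fun l => pvCell l r) := by
  induction SL with
  | nil => intro pre; simp [pvPieces]
  | cons l t ih =>
    intro pre
    simp only [List.map_cons]
    rw [show pvPieces (pre ++ ((pvW l : Nat) : Int) :: t.map (fun l => ((pvW l : Nat) : Int)))
          pre.length (l[r]? :: t.map (fun l => l[r]?))
        = (match l[r]? with
            | some x => x
            | none => PySem.List.pyRepeat [' ']
                (PySem.List.pyGetD (pre ++ ((pvW l : Nat) : Int) :: t.map (fun l => ((pvW l : Nat) : Int)))
                  ((pre.length : Nat) : Int) 0)) ::
          pvPieces (pre ++ ((pvW l : Nat) : Int) :: t.map (fun l => ((pvW l : Nat) : Int)))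
            (pre.length + 1) (t.map (fun l => l[r]?)) from rfl]
    have hget : PySem.List.pyGetD
        (pre ++ ((pvW l : Nat) : Int) :: t.map (fun l => ((pvW l : Nat) : Int)))
        ((pre.length : Nat) : Int) 0 = ((pvW l : Nat) : Int) := by
      rw [PySem.List.pyGetD_natCast]
      simp [List.getD]
    have hrest : pvPieces (pre ++ ((pvW l : Nat) : Int) :: t.map (fun l => ((pvW l : Nat) : Int)))
        (pre.length + 1) (t.map (fun l => l[r]?)) = t.map (fun l => pvCell l r) := by
      have := ih (pre ++ [((pvW l : Nat) : Int)])
      simpa [List.append_assoc] using this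
    rw [hget, hrest]
    congr 1
    cases h : l[r]? with
    | some x => simp [pvCell, List.getD, h]
    | none =>
      simp [pvCell, List.getD, h, PySem.List.pyRepeat_singleton, pvSp]

-- ---- A's builder in rows form (interleaved separators = ' '.join) ----

def pvInterleave : List (List Char) → List (List Char)
  | [] => []
  | [x] => [x]
  | x :: y :: r => x :: [' '] :: pvInterleave (y :: r)

theorem pvJoinInterleave (l : List (List Char)) :
    PySem.Chars.join [] (pvInterleave l) = PySem.Chars.join [' '] l := by
  induction l with
  | nil => simp [pvInterleave, PySem.Chars.join_nil]
  | cons x t ih =>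
    cases t with
    | nil => simp [pvInterleave, PySem.Chars.join_singleton]
    | cons q r =>
      rw [show pvInterleave (x :: q :: r) = x :: [' '] :: pvInterleave (q :: r) from rfl]
      have hne : pvInterleave (q :: r) ≠ [] := by cases r <;> simp [pvInterleave]
      rw [PySem.Chars.join_cons_cons, pvJoinCons [] [' '] _ hne, ih, PySem.Chars.join_cons_cons]
      simp [List.append_assoc]

theorem pvPieces_ne_nil (lens : List Int) (i : Nat) (y : Option (List Char)) (ys : List (Option (List Char))) :
    pvPieces lens i (y :: ys) ≠ [] := by
  cases y <;> simp [pvPieces]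

theorem pvRowInterleave (lens : List Int) (ll : List (Option (List Char))) : ∀ (i n : Nat),
    n = i + ll.length → pvA_row lens n i ll = pvInterleave (pvPieces lens i ll) := by
  induction ll with
  | nil => intro i n h; simp [pvA_row, pvPieces, pvInterleave]
  | cons line rest ih =>
    intro i n h
    cases rest with
    | nil =>
      have hc : ¬ (i ≠ n - 1) := by
        simp only [List.length_cons, List.length_nil] at h; omega
      cases line <;> simp [pvA_row, pvPieces, pvInterleave, if_neg hc]
    | cons r rs =>
      have hc : i ≠ n - 1 := by
        simp only [List.length_cons] at h; omega
      have hn2 : n = (i + 1) + (r :: rs).length := by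
        simp only [List.length_cons] at h ⊢; omega
      obtain ⟨hd, tl, hE⟩ := List.exists_cons_of_ne_nil (pvPieces_ne_nil lens (i + 1) r rs)
      cases line with
      | none =>
        rw [show pvA_row lens n i (none :: r :: rs)
            = PySem.List.pyRepeat [' '] (PySem.List.pyGetD lens (i : Int) 0) ::
              ((if i ≠ n - 1 then [[' ']] else []) ++ pvA_row lens n (i + 1) (r :: rs)) from rfl]
        rw [show pvPieces lens i (none :: r :: rs)
            = PySem.List.pyRepeat [' '] (PySem.List.pyGetD lens (i : Int) 0) ::
              pvPieces lens (i + 1) (r :: rs) from rfl]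
        rw [if_pos hc, ih (i + 1) n hn2, hE]
        simp [pvInterleave]
      | some l =>
        rw [show pvA_row lens n i (some l :: r :: rs)
            = l :: ((if i ≠ n - 1 then [[' ']] else []) ++ pvA_row lens n (i + 1) (r :: rs)) from rfl]
        rw [show pvPieces lens i (some l :: r :: rs)
            = l :: pvPieces lens (i + 1) (r :: rs) from rfl]
        rw [if_pos hc, ih (i + 1) n hn2, hE]
        simp [pvInterleave]

theorem pvBuilder (lens : List Int) (rows : List (List (Option (List Char)))) : ∀ (b : List (List Char)),
    rows.foldl (fun b ll => (b ++ pvA_row lens ll.length 0 ll) ++ [['\n']]) b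
      = b ++ rows.flatMap (fun ll => pvA_row lens ll.length 0 ll ++ [['\n']]) := by
  induction rows with
  | nil => intro b; simp
  | cons ll rest ih =>
    intro b
    simp only [List.foldl_cons, List.flatMap_cons]
    rw [ih]
    simp [List.append_assoc]

theorem pvRowEq (lens : List Int) (ll : List (Option (List Char))) :
    PySem.Chars.join [] (pvA_row lens ll.length 0 ll)
      = PySem.Chars.join [' '] (pvPieces lens 0 ll) := by
  rw [pvRowInterleave lens ll 0 ll.length (by omega), pvJoinInterleave]

theorem pvStack (lens : List Int) (rows : List (List (Option (List Char)))) :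
    PySem.Chars.join []
        ((rows.foldl (fun b ll => (b ++ pvA_row lens ll.length 0 ll) ++ [['\n']]) []).dropLast)
      = PySem.Chars.join ['\n']
        (rows.map (fun ll => PySem.Chars.join [' '] (pvPieces lens 0 ll))) := by
  rw [pvBuilder, List.nil_append]
  induction rows with
  | nil => simp [PySem.Chars.join_nil]
  | cons ll rest ih =>
    cases rest with
    | nil =>
      simp only [List.flatMap_cons, List.flatMap_nil, List.append_nil, List.map_cons, List.map_nil]
      rw [List.dropLast_concat, PySem.Chars.join_singleton]
      exact pvRowEq lens ll
    | cons r rs =>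
      have hne : List.flatMap (fun ll => pvA_row lens ll.length 0 ll ++ [['\n']]) (r :: rs) ≠ [] := by
        simp
      rw [show List.flatMap (fun ll => pvA_row lens ll.length 0 ll ++ [['\n']]) (ll :: r :: rs)
          = (pvA_row lens ll.length 0 ll ++ [['\n']])
            ++ List.flatMap (fun ll => pvA_row lens ll.length 0 ll ++ [['\n']]) (r :: rs) from by
        simp]
      rw [List.dropLast_append_of_ne_nil hne]
      rw [pvJoinNil, List.flatten_append, List.flatten_append]
      rw [show ([['\n']] : List (List Char)).flatten = ['\n'] from rfl]
      rw [pvJoinNil] at ih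
      rw [ih]
      have hrow : (pvA_row lens ll.length 0 ll).flatten = PySem.Chars.join [' '] (pvPieces lens 0 ll) := by
        rw [← pvJoinNil]; exact pvRowEq lens ll
      rw [hrow, List.map_cons, List.map_cons, List.map_cons, PySem.Chars.join_cons_cons]

theorem pvPieces_eq0 (r : Nat) (SL : List (List (List Char))) :
    pvPieces (SL.map (fun l => ((pvW l : Nat) : Int))) 0 (SL.map (fun l => l[r]?))
      = SL.map (fun l => pvCell l r) := by
  simpa using pvPieces_eq r SL []

-- A in rows form
theorem pvA_rows (blocks : List String) :
    stack_str_blocks blocks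
      = String.ofList (PySem.Chars.join ['\n']
          ((List.range (pvH (blocks.map (fun bl => PySem.Chars.splitOn bl.toList "\n".toList)))).map
            (pvRow (blocks.map (fun bl => PySem.Chars.splitOn bl.toList "\n".toList))))) := by
  simp only [stack_str_blocks]
  set SL := blocks.map (fun bl => PySem.Chars.splitOn bl.toList "\n".toList) with hSL
  have hnl : ("\n" : String).toList = ['\n'] := rfl
  have hlens : blocks.map block_width = SL.map (fun l => ((pvW l : Nat) : Int)) := by
    rw [hSL, List.map_map]
    apply List.map_congr_left
    intro bl _
    simp only [Function.comp]
    rw [pvBlockWidth, hnl, pvSplitOn_eq]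
    rfl
  rw [hlens, PySem.List.slice_to_neg_one, pvStack, pvZip_eq, List.map_map]
  congr 1
  congr 1
  apply List.map_congr_left
  intro r _
  simp only [Function.comp]
  rw [pvPieces_eq0 r SL]
  rfl

-- ---- B's fold in rows form ----

theorem pvJoinSp (ns : List Nat) (h : ns ≠ []) :
    PySem.Chars.join [' '] (ns.map pvSp) = pvSp (ns.sum + (ns.length - 1)) := by
  induction ns with
  | nil => exact absurd rfl h
  | cons n t ih =>
    cases t with
    | nil => simp [PySem.Chars.join_singleton]
    | cons m r =>
      rw [List.map_cons, pvJoinCons [' '] _ _ (by simp), ih (by simp)]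
      simp only [pvSp, List.sum_cons, List.length_cons]
      rw [show n + (m + r.sum) + (r.length + 1 + 1 - 1)
            = (n + 1) + (m + r.sum + (r.length + 1 - 1)) from by omega]
      conv_rhs => rw [List.replicate_add, List.replicate_succ']

theorem pvRow_full (SL : List (List (List Char))) (r : Nat) (hne : SL ≠ [])
    (hr : pvH SL ≤ r) : pvRow SL r = pvSp (pvWidth SL) := by
  unfold pvRow
  have hcell : SL.map (fun l => pvCell l r) = (SL.map pvW).map pvSp := by
    rw [List.map_map]
    apply List.map_congr_left
    intro l hl
    have : l.length ≤ r := le_trans (pvLe_pvH SL l hl) hr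
    simp [pvCell, Function.comp, List.getD, List.getElem?_eq_none this]
  rw [hcell, pvJoinSp _ (by simpa using hne)]
  unfold pvWidth
  simp

theorem pvRow_append (SL : List (List (List Char))) (L : List (List Char)) (r : Nat)
    (hne : SL ≠ []) :
    pvRow (SL ++ [L]) r = pvRow SL r ++ [' '] ++ pvCell L r := by
  unfold pvRow
  rw [List.map_append, List.map_cons, List.map_nil,
      pvJoinSnoc [' '] _ _ (by simpa using hne)]

theorem pvH_append (SL : List (List (List Char))) (L : List (List Char)) :
    pvH (SL ++ [L]) = max (pvH SL) L.length := by
  induction SL with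
  | nil => simp [pvH]
  | cons x t ih =>
    simp only [pvH, List.cons_append, List.foldr_cons] at *
    rw [ih]
    omega

-- the fold invariant: piece rows join to the row description, lengths and width agree
def pvInvP (SL : List (List (List Char))) (st : List (List (List Char)) × Int) : Prop :=
  st.1.length = pvH SL ∧ (∀ row ∈ st.1, row ≠ []) ∧
  st.1.map (fun row => PySem.Chars.join [' '] row) = (List.range (pvH SL)).map (pvRow SL) ∧
  st.2 = ((pvWidth SL : Nat) : Int)

theorem pvStep (SL : List (List (List Char))) (b : String)
    (st : List (List (List Char)) × Int)
    (hne : SL ≠ []) (h1 : 1 ≤ pvH SL) (hinv : pvInvP SL st) :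
    pvInvP (SL ++ [PySem.Chars.splitOn b.toList "\n".toList]) (pvB_step st b) := by
  obtain ⟨hlen, hnz, hjoin, hwidth⟩ := hinv
  set L := PySem.Chars.splitOn b.toList "\n".toList with hL
  set H := pvH SL with hH
  set H' := max H L.length with hH'
  have hH'' : pvH (SL ++ [L]) = H' := by rw [pvH_append]
  have hrep : ∀ (n : Nat), PySem.List.pyRepeat [' '] ((n : Nat) : Int) = pvSp n := by
    intro n
    rw [PySem.List.pyRepeat_singleton]
    simp [pvSp]
  have hwL : ((L.headD []).length : Int) = ((pvW L : Nat) : Int) := rfl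
  unfold pvB_step
  simp only
  rw [if_neg (by simp only [List.isEmpty_iff]; intro hc; rw [hc] at hlen; simp at hlen; omega)]
  rw [← hL, hlen, hwidth, hrep, hwL, hrep]
  -- the padded rows, uniformly over the two branches
  have hp : (if H < L.length then
        st.1 ++ List.replicate (L.length - H) [pvSp (pvWidth SL)]
      else st.1)
      = st.1 ++ List.replicate (H' - H) [pvSp (pvWidth SL)] := by
    by_cases hc : H < L.length
    · rw [if_pos hc, show H' = L.length from by omega]
    · rw [if_neg hc, show H' - H = 0 from by omega]
      simp
  rw [hp]
  set rows2 := st.1 ++ List.replicate (H' - H) [pvSp (pvWidth SL)] with hrows2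
  have hlen2 : rows2.length = H' := by
    rw [hrows2]
    simp [hlen]
    omega
  have hjr : ∀ (r : Nat) (hr : r < H),
      PySem.Chars.join [' '] (st.1[r]'(by omega)) = pvRow SL r := by
    intro r hr
    have h := congrArg (fun (l : List (List Char)) => l[r]?) hjoin
    simp only [List.getElem?_map,
      List.getElem?_eq_getElem (show r < st.1.length from by omega),
      List.getElem?_eq_getElem (show r < (List.range H).length from by simpa using hr)] at h
    simpa using h
  refine ⟨?_, ?_, ?_, ?_⟩
  · simp [hlen2, hH'']
  · intro row hrow
    simp only [List.mem_map] at hrow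
    obtain ⟨p, _, hp2⟩ := hrow
    rw [← hp2]
    simp
  · apply List.ext_getElem
    · simp [hlen2, hH'']
    · intro r hr1 hr2
      simp only [List.length_map, List.length_zipIdx, hlen2] at hr1
      have hrr2 : r < rows2.length := by omega
      simp only [List.getElem_map, List.getElem_zipIdx, Nat.zero_add, List.getElem_range]
      have hcell : L.getD r (pvSp (L.headD []).length) = pvCell L r := by
        simp [pvCell, pvW]
      have hnz2 : rows2[r]'hrr2 ≠ [] := by
        rw [List.getElem_of_eq hrows2]
        by_cases hrH : r < H
        · rw [List.getElem_append_left (by omega)]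
          exact hnz _ (List.getElem_mem _)
        · rw [List.getElem_append_right (by rw [hlen]; omega)]
          simp
      rw [hcell, pvJoinSnoc _ _ _ hnz2]
      rw [pvRow_append SL L r hne]
      congr 1
      congr 1
      by_cases hrH : r < H
      · rw [show rows2[r]'hrr2 = st.1[r]'(by omega) from by
          rw [List.getElem_of_eq hrows2]
          exact List.getElem_append_left (by omega)]
        exact hjr r hrH
      · rw [show rows2[r]'hrr2 = [pvSp (pvWidth SL)] from by
          rw [List.getElem_of_eq hrows2]
          rw [List.getElem_append_right (by rw [hlen]; omega)]
          simp]
        rw [PySem.Chars.join_singleton]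
        exact (pvRow_full SL r hne (by omega)).symm
  · have hlen1 : 1 ≤ SL.length := by
      cases SL with
      | nil => exact absurd rfl hne
      | cons _ _ => simp
    unfold pvWidth
    push_cast
    simp only [List.map_append, List.map_cons, List.map_nil, List.sum_append, List.sum_cons,
      List.sum_nil, List.length_append, List.length_cons, List.length_nil]
    push_cast
    omega

theorem pvInv (blocks : List String) (hne : blocks ≠ []) :
    pvInvP (blocks.map (fun bl => PySem.Chars.splitOn bl.toList "\n".toList))
      (blocks.foldl pvB_step ([], 0)) := by
  induction blocks using List.reverseRecOn with
  | nil => exact absurd rfl hne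
  | append_singleton bs b ih =>
    rw [List.foldl_append, List.foldl_cons, List.foldl_nil]
    cases hbs : bs with
    | nil =>
      subst hbs
      simp only [List.foldl_nil, List.map_cons, List.map_nil, List.nil_append]
      unfold pvB_step
      simp only
      rw [if_pos (by simp)]
      set L := PySem.Chars.splitOn b.toList "\n".toList with hL
      have hH : pvH [L] = L.length := by simp [pvH]
      refine ⟨by simp [hH], by intro row hrow; simp at hrow; obtain ⟨x, _, hx⟩ := hrow; simp [← hx], ?_, ?_⟩
      · rw [List.map_map, hH]
        rw [show (List.range L.length).map (pvRow [L])
              = (List.range L.length).map (fun r => L.getD r (pvSp (pvW L))) from by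
            apply List.map_congr_left
            intro r _
            simp [pvRow, PySem.Chars.join_singleton, pvCell],
          pvMapGetD L (pvSp (pvW L))]
        have hid : ∀ l ∈ L, ((fun row => PySem.Chars.join [' '] row) ∘ fun l : List Char => [l]) l = id l := by
          intro l _
          simp [Function.comp, PySem.Chars.join_singleton]
        rw [List.map_congr_left hid, List.map_id]
      · simp [pvWidth, pvW]
    | cons b0 bs0 =>
      rw [← hbs]
      have hbs_ne : bs ≠ [] := by rw [hbs]; simp
      set SL := bs.map (fun bl => PySem.Chars.splitOn bl.toList "\n".toList) with hSL
      have hSLne : SL ≠ [] := by rw [hSL, hbs]; simp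
      have hH1 : 1 ≤ pvH SL := by
        have hmem : PySem.Chars.splitOn b0.toList "\n".toList ∈ SL := by
          rw [hSL, hbs]; simp
        have hne0 : PySem.Chars.splitOn b0.toList "\n".toList ≠ [] := by
          rw [show ("\n" : String).toList = ['\n'] from rfl, pvSplitOn_eq]
          exact List.splitOnP_ne_nil _ _
        have hle := pvLe_pvH SL _ hmem
        have h0 : 1 ≤ (PySem.Chars.splitOn b0.toList "\n".toList).length := by
          cases h : PySem.Chars.splitOn b0.toList "\n".toList with
          | nil => exact absurd h hne0
          | cons _ _ => simp
        omega
      have := pvStep SL b (bs.foldl pvB_step ([], 0)) hSLne hH1 (ih hbs_ne)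
      simpa [hSL, List.map_append] using this

-- ===== VERDICT (by name: the statement is the Claim_ definition above) =====
theorem stack_str_blocks_spec : Claim_equal_stack_str_blocks := by
  intro blocks _
  unfold Spec_stack_str_blocks
  cases hb : blocks with
  | nil =>
    simp only [stack_str_blocks, stack_str_blocks_alt, List.map_nil, List.foldl_nil]
    rw [show pvZipLongest [] = [] from by rw [pvZipLongest]; simp]
    rfl
  | cons b0 bs0 =>
    rw [← hb]
    have hne : blocks ≠ [] := by rw [hb]; simp
    rw [pvA_rows]
    simp only [stack_str_blocks_alt]
    obtain ⟨_, _, hjoin, _⟩ := pvInv blocks hne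
    rw [hjoin]
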